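-- pv_equiv track=rewrite | github.com/LukeGibson/SquashVision | Project/src/Project/mainDecision.py | expandTrackGaps
-- ===== SOURCE A (Python) =====
-- def expandTrackGaps(trackPoints):
--     cleanTrackPoints = []
--     cleanTrackPoints.append(trackPoints[0])
--     cleanTrackPoints.append(trackPoints[0])
--
--     # if either neighbouring point doesn't have a ball detection assume the detection in current point is poor
--     for i in range(2, len(trackPoints) - 2):
--         x, y, r = trackPoints[i]
--
--         if trackPoints[i-1] != (-1,-1,0) and trackPoints[i+1] != (-1,-1,0) and trackPoints[i+2] != (-1,-1,0) and trackPoints[i-2] != (-1,-1,0):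
--             cleanTrackPoints.append((x,y,r))
--         else:
--             cleanTrackPoints.append((-1,-1,0))
--
--     cleanTrackPoints.append(trackPoints[-1])
--     cleanTrackPoints.append(trackPoints[-1])
--
--     return cleanTrackPoints
-- ===== SOURCE B (Python) =====
-- def expandTrackGaps(trackPoints):
--     n = len(trackPoints)
--     # collect gap indices once, then dilate each by +-1 and +-2
--     bad = set()
--     for g in range(n):
--         if trackPoints[g] == (-1, -1, 0):
--             bad.update((g - 2, g - 1, g + 1, g + 2))
--     interior = [(-1, -1, 0) if i in bad else (trackPoints[i][0], trackPoints[i][1], trackPoints[i][2])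
--                 for i in range(2, n - 2)]
--     return [trackPoints[0], trackPoints[0]] + interior + [trackPoints[-1], trackPoints[-1]]
-- ===== Notes on version B (the rewrite author's own statement) =====
-- stated objective: alternative
-- what changed: Instead of checking the four neighbours of every interior point, B scans once for gap points, dilates their indices by +-1/+-2 into a bad-index set, and builds the interior in a second pass from that set.
-- outside the precondition, e.g. on expandTrackGaps([]): A raises IndexError, B raises IndexError
import Mathlib
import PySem

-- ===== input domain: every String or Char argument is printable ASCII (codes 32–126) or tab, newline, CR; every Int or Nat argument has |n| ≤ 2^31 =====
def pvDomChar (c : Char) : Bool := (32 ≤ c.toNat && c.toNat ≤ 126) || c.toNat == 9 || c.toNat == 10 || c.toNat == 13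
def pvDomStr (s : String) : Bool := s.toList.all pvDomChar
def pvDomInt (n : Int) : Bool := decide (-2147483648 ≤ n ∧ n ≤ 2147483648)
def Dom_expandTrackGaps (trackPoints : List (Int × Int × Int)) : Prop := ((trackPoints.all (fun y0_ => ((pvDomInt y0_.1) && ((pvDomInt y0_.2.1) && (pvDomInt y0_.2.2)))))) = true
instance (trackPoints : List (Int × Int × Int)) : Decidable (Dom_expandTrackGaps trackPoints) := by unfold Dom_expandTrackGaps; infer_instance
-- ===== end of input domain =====

-- B replaces A's four per-point neighbour lookups by one collect-gap-indices-then-dilate pass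
-- (objective: alternative decomposition, same asymptotic cost).

-- ===== PORT A =====
def expandTrackGaps (trackPoints : List (Int × Int × Int)) : List (Int × Int × Int) :=
  let clean0 : List (Int × Int × Int) :=
    [PySem.List.pyGetD trackPoints 0 (0, 0, 0), PySem.List.pyGetD trackPoints 0 (0, 0, 0)]
  let clean1 :=
    (PySem.List.pyRange 2 ((trackPoints.length : Int) - 2) 1).foldl (fun acc i =>
      let p := PySem.List.pyGetD trackPoints i (0, 0, 0)
      if PySem.List.pyGetD trackPoints (i - 1) (0, 0, 0) ≠ (-1, -1, 0) ∧
         PySem.List.pyGetD trackPoints (i + 1) (0, 0, 0) ≠ (-1, -1, 0) ∧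
         PySem.List.pyGetD trackPoints (i + 2) (0, 0, 0) ≠ (-1, -1, 0) ∧
         PySem.List.pyGetD trackPoints (i - 2) (0, 0, 0) ≠ (-1, -1, 0)
      then acc ++ [(p.1, p.2.1, p.2.2)]
      else acc ++ [(-1, -1, 0)]) clean0
  clean1 ++ [PySem.List.pyGetD trackPoints (-1) (0, 0, 0), PySem.List.pyGetD trackPoints (-1) (0, 0, 0)]

-- ===== PORT B =====
def expandTrackGaps_alt (trackPoints : List (Int × Int × Int)) : List (Int × Int × Int) :=
  let n : Int := trackPoints.length
  let bad : PySem.Set Int :=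
    (PySem.List.pyRange 0 n 1).foldl (fun s g =>
      if PySem.List.pyGetD trackPoints g (0, 0, 0) = (-1, -1, 0)
      then PySem.Set.update s [g - 2, g - 1, g + 1, g + 2]
      else s) PySem.Set.empty
  let interior := (PySem.List.pyRange 2 (n - 2) 1).map (fun i =>
      if PySem.Set.contains bad i then (-1, -1, 0)
      else ((PySem.List.pyGetD trackPoints i (0, 0, 0)).1,
            (PySem.List.pyGetD trackPoints i (0, 0, 0)).2.1,
            (PySem.List.pyGetD trackPoints i (0, 0, 0)).2.2))
  [PySem.List.pyGetD trackPoints 0 (0, 0, 0), PySem.List.pyGetD trackPoints 0 (0, 0, 0)] ++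
    interior ++
    [PySem.List.pyGetD trackPoints (-1) (0, 0, 0), PySem.List.pyGetD trackPoints (-1) (0, 0, 0)]

-- ===== PRECONDITION & SPEC =====
-- Pre_ excludes only the empty list, on which Python A raises IndexError at trackPoints[0].
def Pre_expandTrackGaps (trackPoints : List (Int × Int × Int)) : Prop := trackPoints ≠ []
instance (trackPoints : List (Int × Int × Int)) : Decidable (Pre_expandTrackGaps trackPoints) := by
  unfold Pre_expandTrackGaps; infer_instance
def pvWitness_expandTrackGaps : (List (Int × Int × Int)) := [(1, 2, 3), (-1, -1, 0), (4, 5, 6), (7, 8, 9), (10, 11, 12), (13, 14, 15)]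

def Spec_expandTrackGaps (trackPoints : List (Int × Int × Int)) (out : List (Int × Int × Int)) : Prop := out = expandTrackGaps_alt trackPoints
instance (trackPoints : List (Int × Int × Int)) (out : List (Int × Int × Int)) : Decidable (Spec_expandTrackGaps trackPoints out) := by unfold Spec_expandTrackGaps; infer_instance

-- ===== CLAIM (what is proved, stated in full; the proofs are below) =====
def Claim_equal_expandTrackGaps : Prop := ∀ (trackPoints : List (Int × Int × Int)), Dom_expandTrackGaps trackPoints → Pre_expandTrackGaps trackPoints → Spec_expandTrackGaps trackPoints (expandTrackGaps trackPoints)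

-- ===== LEMMAS AND PROOFS =====

-- Membership in B's dilated gap set, for any prefix of the scan.
theorem mem_badFold (tp : List (Int × Int × Int)) (L : List Int) (s : PySem.Set Int) (x : Int) :
    x ∈ L.foldl (fun s g =>
        if PySem.List.pyGetD tp g (0, 0, 0) = (-1, -1, 0)
        then PySem.Set.update s [g - 2, g - 1, g + 1, g + 2]
        else s) s ↔
      x ∈ s ∨ ∃ g ∈ L, PySem.List.pyGetD tp g (0, 0, 0) = (-1, -1, 0) ∧
        (x = g - 2 ∨ x = g - 1 ∨ x = g + 1 ∨ x = g + 2) := by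
  induction L generalizing s with
  | nil => simp
  | cons a L ih =>
      simp only [List.foldl_cons, ih]
      by_cases h : PySem.List.pyGetD tp a (0, 0, 0) = (-1, -1, 0) <;>
        simp [h, PySem.Set.update, PySem.Set.mem_add, or_assoc]

theorem expandTrackGaps_spec : Claim_equal_expandTrackGaps := by
  intro tp _ _
  unfold Spec_expandTrackGaps expandTrackGaps expandTrackGaps_alt
  simp only []
  have hfun : (fun (acc : List (Int × Int × Int)) (i : Int) =>
      let p := PySem.List.pyGetD tp i (0, 0, 0)
      if PySem.List.pyGetD tp (i - 1) (0, 0, 0) ≠ (-1, -1, 0) ∧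
         PySem.List.pyGetD tp (i + 1) (0, 0, 0) ≠ (-1, -1, 0) ∧
         PySem.List.pyGetD tp (i + 2) (0, 0, 0) ≠ (-1, -1, 0) ∧
         PySem.List.pyGetD tp (i - 2) (0, 0, 0) ≠ (-1, -1, 0)
      then acc ++ [(p.1, p.2.1, p.2.2)]
      else acc ++ [(-1, -1, 0)]) =
      (fun acc i => acc ++
        [if PySem.List.pyGetD tp (i - 1) (0, 0, 0) ≠ (-1, -1, 0) ∧
            PySem.List.pyGetD tp (i + 1) (0, 0, 0) ≠ (-1, -1, 0) ∧
            PySem.List.pyGetD tp (i + 2) (0, 0, 0) ≠ (-1, -1, 0) ∧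
            PySem.List.pyGetD tp (i - 2) (0, 0, 0) ≠ (-1, -1, 0)
         then ((PySem.List.pyGetD tp i (0, 0, 0)).1,
               (PySem.List.pyGetD tp i (0, 0, 0)).2.1,
               (PySem.List.pyGetD tp i (0, 0, 0)).2.2)
         else (-1, -1, 0)]) := by
    funext acc i
    by_cases h : PySem.List.pyGetD tp (i - 1) (0, 0, 0) ≠ (-1, -1, 0) ∧
         PySem.List.pyGetD tp (i + 1) (0, 0, 0) ≠ (-1, -1, 0) ∧
         PySem.List.pyGetD tp (i + 2) (0, 0, 0) ≠ (-1, -1, 0) ∧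
         PySem.List.pyGetD tp (i - 2) (0, 0, 0) ≠ (-1, -1, 0) <;> simp [h]
  rw [hfun, PySem.List.foldl_append_singleton_eq_map]
  refine congrArg (· ++ _) (congrArg ([PySem.List.pyGetD tp 0 (0, 0, 0), PySem.List.pyGetD tp 0 (0, 0, 0)] ++ ·) ?_)
  apply List.map_congr_left
  intro i hi
  rw [PySem.List.mem_pyRange_one] at hi
  have hbad : (PySem.Set.contains
      ((PySem.List.pyRange 0 (↑tp.length) 1).foldl (fun s g =>
        if PySem.List.pyGetD tp g (0, 0, 0) = (-1, -1, 0)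
        then PySem.Set.update s [g - 2, g - 1, g + 1, g + 2]
        else s) PySem.Set.empty) i = true) ↔
      ¬ (PySem.List.pyGetD tp (i - 1) (0, 0, 0) ≠ (-1, -1, 0) ∧
         PySem.List.pyGetD tp (i + 1) (0, 0, 0) ≠ (-1, -1, 0) ∧
         PySem.List.pyGetD tp (i + 2) (0, 0, 0) ≠ (-1, -1, 0) ∧
         PySem.List.pyGetD tp (i - 2) (0, 0, 0) ≠ (-1, -1, 0)) := by
    simp only [PySem.Set.contains, List.contains_iff_mem]
    rw [mem_badFold]
    simp only [PySem.Set.empty, List.not_mem_nil, false_or, PySem.List.mem_pyRange_one]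
    constructor
    · rintro ⟨g, ⟨hg0, hgn⟩, hgap, hx⟩ hcond
      rcases hx with h | h | h | h <;>
        [ (exact hcond.2.2.1 (by rw [show i + 2 = g by omega]; exact hgap));
          (exact hcond.2.1 (by rw [show i + 1 = g by omega]; exact hgap));
          (exact hcond.1 (by rw [show i - 1 = g by omega]; exact hgap));
          (exact hcond.2.2.2 (by rw [show i - 2 = g by omega]; exact hgap)) ]
    · intro hcond
      by_cases h1 : PySem.List.pyGetD tp (i - 1) (0, 0, 0) = (-1, -1, 0)
      · exact ⟨i - 1, ⟨by omega, by omega⟩, h1, by omega⟩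
      by_cases h2 : PySem.List.pyGetD tp (i + 1) (0, 0, 0) = (-1, -1, 0)
      · exact ⟨i + 1, ⟨by omega, by omega⟩, h2, by omega⟩
      by_cases h3 : PySem.List.pyGetD tp (i + 2) (0, 0, 0) = (-1, -1, 0)
      · exact ⟨i + 2, ⟨by omega, by omega⟩, h3, by omega⟩
      by_cases h4 : PySem.List.pyGetD tp (i - 2) (0, 0, 0) = (-1, -1, 0)
      · exact ⟨i - 2, ⟨by omega, by omega⟩, h4, by omega⟩
      exact absurd ⟨h1, h2, h3, h4⟩ hcond
  by_cases hb : PySem.Set.contains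
      ((PySem.List.pyRange 0 (↑tp.length) 1).foldl (fun s g =>
        if PySem.List.pyGetD tp g (0, 0, 0) = (-1, -1, 0)
        then PySem.Set.update s [g - 2, g - 1, g + 1, g + 2]
        else s) PySem.Set.empty) i = true
  · rw [if_neg (hbad.mp hb), if_pos hb]
  · have hc : PySem.List.pyGetD tp (i - 1) (0, 0, 0) ≠ (-1, -1, 0) ∧
         PySem.List.pyGetD tp (i + 1) (0, 0, 0) ≠ (-1, -1, 0) ∧
         PySem.List.pyGetD tp (i + 2) (0, 0, 0) ≠ (-1, -1, 0) ∧
         PySem.List.pyGetD tp (i - 2) (0, 0, 0) ≠ (-1, -1, 0) := by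
      by_contra h
      exact hb (hbad.mpr h)
    rw [if_pos hc, if_neg hb]
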